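-- pv_equiv track=rewrite | github.com/alimkhann/commitly | commitly-backend/app/services/timeline_builder.py | compute_snake_coordinates
-- ===== SOURCE A (Python) =====
-- from typing import List, Optional
--
-- DEFAULT_PER_ROW = 6
--
-- def compute_snake_coordinates(total_nodes: int, spacing_x: int = 160, spacing_y: int = 140) -> List[tuple[int, int]]:
--     per_row = max(3, min(DEFAULT_PER_ROW, total_nodes)) if total_nodes <= DEFAULT_PER_ROW else DEFAULT_PER_ROW
--     coords: List[tuple[int, int]] = []
--     for idx in range(total_nodes):
--         row = idx // per_row
--         col = idx % per_row
--         if row % 2 == 1: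
--             col = per_row - 1 - col
--         x = col * spacing_x
--         y = row * spacing_y
--         coords.append((x, y))
--     return coords
-- ===== SOURCE B (Python) =====
-- from typing import List
--
-- DEFAULT_PER_ROW = 6
--
-- def compute_snake_coordinates(total_nodes: int, spacing_x: int = 160, spacing_y: int = 140) -> List[tuple[int, int]]:
--     per_row = max(3, min(DEFAULT_PER_ROW, total_nodes)) if total_nodes <= DEFAULT_PER_ROW else DEFAULT_PER_ROW
--     rows = (total_nodes + per_row - 1) // per_row
--     coords: List[tuple[int, int]] = []
--     for row in range(rows):
--         k = min(per_row, total_nodes - row * per_row)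
--         if row % 2 == 0:
--             cols = range(k)
--         else:
--             cols = range(per_row - 1, per_row - 1 - k, -1)
--         for col in cols:
--             coords.append((col * spacing_x, row * spacing_y))
--     return coords
-- ===== Notes on version B (the rewrite author's own statement) =====
-- stated objective: alternative
-- what changed: Replaces the flat per-index loop with idx//per_row and idx%per_row by an outer loop over rows that computes each row's node count and emits its columns directly, left-to-right on even rows and right-to-left on odd rows.
import Mathlib
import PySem

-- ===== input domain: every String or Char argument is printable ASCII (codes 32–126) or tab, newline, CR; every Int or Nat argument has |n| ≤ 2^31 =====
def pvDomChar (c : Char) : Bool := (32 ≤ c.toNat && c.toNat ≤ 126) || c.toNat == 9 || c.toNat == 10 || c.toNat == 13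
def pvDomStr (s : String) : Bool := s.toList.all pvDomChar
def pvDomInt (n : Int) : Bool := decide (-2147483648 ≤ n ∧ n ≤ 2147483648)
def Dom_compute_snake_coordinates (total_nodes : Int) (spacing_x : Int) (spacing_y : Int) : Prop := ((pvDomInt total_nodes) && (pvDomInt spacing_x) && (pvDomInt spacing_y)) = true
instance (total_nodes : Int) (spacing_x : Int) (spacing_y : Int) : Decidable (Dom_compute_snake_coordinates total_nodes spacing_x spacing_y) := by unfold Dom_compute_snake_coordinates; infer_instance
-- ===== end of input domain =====

-- B replaces A's per-index div/mod arithmetic by an outer loop over rows that emits each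
-- row's columns directly (left-to-right on even rows, right-to-left on odd rows): an
-- alternative decomposition of the same O(n) computation, same return value.

-- ===== PORT A =====
def compute_snake_coordinates (total_nodes : Int) (spacing_x : Int) (spacing_y : Int) : List (Int × Int) :=
  let per_row : Int := if total_nodes ≤ 6 then max 3 (min 6 total_nodes) else 6
  (PySem.List.pyRange 0 total_nodes 1).foldl (fun coords idx =>
    let row := PySem.Int.floordiv idx per_row
    let col := PySem.Int.mod idx per_row
    let col := if PySem.Int.mod row 2 = 1 then per_row - 1 - col else col
    let x := col * spacing_x
    let y := row * spacing_y
    coords ++ [(x, y)]) []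

-- ===== PORT B =====
def compute_snake_coordinates_alt (total_nodes : Int) (spacing_x : Int) (spacing_y : Int) : List (Int × Int) :=
  let per_row : Int := if total_nodes ≤ 6 then max 3 (min 6 total_nodes) else 6
  let rows : Int := PySem.Int.floordiv (total_nodes + per_row - 1) per_row
  (PySem.List.pyRange 0 rows 1).foldl (fun coords row =>
    let k := min per_row (total_nodes - row * per_row)
    let cols := if PySem.Int.mod row 2 = 0
      then PySem.List.pyRange 0 k 1
      else PySem.List.pyRange (per_row - 1) (per_row - 1 - k) (-1)
    cols.foldl (fun acc col => acc ++ [(col * spacing_x, row * spacing_y)]) coords) []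

-- ===== PRECONDITION & SPEC =====
def Spec_compute_snake_coordinates (total_nodes : Int) (spacing_x : Int) (spacing_y : Int) (out : List (Int × Int)) : Prop := out = compute_snake_coordinates_alt total_nodes spacing_x spacing_y
instance (total_nodes : Int) (spacing_x : Int) (spacing_y : Int) (out : List (Int × Int)) : Decidable (Spec_compute_snake_coordinates total_nodes spacing_x spacing_y out) := by unfold Spec_compute_snake_coordinates; infer_instance

-- ===== CLAIM (what is proved, stated in full; the proofs are below) =====
def Claim_equal_compute_snake_coordinates : Prop := ∀ (total_nodes : Int) (spacing_x : Int) (spacing_y : Int), Dom_compute_snake_coordinates total_nodes spacing_x spacing_y → Spec_compute_snake_coordinates total_nodes spacing_x spacing_y (compute_snake_coordinates total_nodes spacing_x spacing_y)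

-- ===== LEMMAS AND PROOFS =====

-- A's per-index body, as a function of the index.
def pvF (p sx sy idx : Int) : Int × Int :=
  let row := PySem.Int.floordiv idx p
  let col := PySem.Int.mod idx p
  let col := if PySem.Int.mod row 2 = 1 then p - 1 - col else col
  (col * sx, row * sy)

-- B's per-row output, as a function of the row.
def pvH (p sx sy n row : Int) : List (Int × Int) :=
  let k := min p (n - row * p)
  let cols := if PySem.Int.mod row 2 = 0
    then PySem.List.pyRange 0 k 1
    else PySem.List.pyRange (p - 1) (p - 1 - k) (-1)
  cols.map (fun col => (col * sx, row * sy))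

theorem pv_foldl_push {α β : Type} (g : α → β) (l : List α) (init : List β) :
    l.foldl (fun acc x => acc ++ [g x]) init = init ++ l.map g := by
  induction l generalizing init with
  | nil => simp
  | cons a t ih => simp [List.foldl_cons, ih]

theorem pv_foldl_nested {α β γ : Type} (cols : α → List γ) (g : α → γ → β)
    (l : List α) (init : List β) :
    l.foldl (fun acc r => (cols r).foldl (fun a c => a ++ [g r c]) acc) init
      = init ++ l.flatMap (fun r => (cols r).map (g r)) := by
  induction l generalizing init with
  | nil => simp
  | cons a t ih =>
    rw [List.foldl_cons, pv_foldl_push, ih, List.flatMap_cons, List.append_assoc]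

theorem pv_chunk (p sx sy n row : Int) (hp : 0 < p) :
    (PySem.List.pyRange (row * p) (min ((row + 1) * p) n) 1).map (pvF p sx sy)
      = pvH p sx sy n row := by
  have hrp1 : (row + 1) * p = row * p + p := by ring
  have hk : min ((row + 1) * p) n - row * p = min p (n - row * p) := by omega
  have hmod2 : PySem.Int.mod row 2 = 0 ∨ PySem.Int.mod row 2 = 1 := by
    have h1 := PySem.Int.mod_nonneg row (b := 2) (by omega)
    have h2 := PySem.Int.mod_lt row (b := 2) (by omega)
    omega
  have helt : ∀ (j : Nat), (j : Int) < min p (n - row * p) →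
      pvF p sx sy (row * p + (j : Int)) =
        (((if PySem.Int.mod row 2 = 1 then p - 1 - (j : Int) else (j : Int))) * sx, row * sy) := by
    intro j hj
    have hjp : (j : Int) < p := by omega
    have hdiv : PySem.Int.floordiv (row * p + (j : Int)) p = row := by
      rw [PySem.Int.floordiv_eq_iff_of_pos hp]
      constructor
      · omega
      · omega
    have hmodp : PySem.Int.mod (row * p + (j : Int)) p = (j : Int) := by
      have h := PySem.Int.floordiv_mul_add_mod (row * p + (j : Int)) p
      rw [hdiv] at h
      omega
    simp [pvF, hdiv, hmodp]
  rcases hmod2 with he | ho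
  · simp only [pvH, he, reduceIte]
    rw [PySem.List.pyRange_one (row * p), PySem.List.pyRange_one 0, List.map_map, List.map_map]
    have hlen : (min ((row + 1) * p) n - row * p).toNat = (min p (n - row * p) - 0).toNat := by omega
    rw [hlen]
    apply List.map_congr_left
    intro j hj
    have hj' : (j : Int) < min p (n - row * p) := by
      simp only [List.mem_range] at hj
      omega
    have := helt j hj'
    simp only [Function.comp] at *
    rw [this, he]
    simp
  · simp only [pvH, ho]
    norm_num
    rw [PySem.List.pyRange_one (row * p), PySem.List.pyRange_neg_one, List.map_map, List.map_map]
    have hlen : (min ((row + 1) * p) n - row * p).toNat = (p - 1 - (p - 1 - min p (n - row * p))).toNat := by omega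
    rw [hlen]
    apply List.map_congr_left
    intro j hj
    have hj' : (j : Int) < min p (n - row * p) := by
      simp only [List.mem_range] at hj
      omega
    have := helt j hj'
    simp only [Function.comp] at *
    rw [this, ho]
    simp

theorem pv_key (p sx sy n : Int) (hp : 0 < p) (m : Nat) :
    ∀ (row : Int), 0 ≤ row → PySem.Int.floordiv (n + p - 1) p = row + m →
      (PySem.List.pyRange (row * p) n 1).map (pvF p sx sy)
        = (PySem.List.pyRange row (row + m) 1).flatMap (pvH p sx sy n) := by
  induction m with
  | zero =>
    intro row _ hfd
    rw [PySem.Int.floordiv_eq_iff_of_pos hp] at hfd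
    have h1 : (row + (0 : Nat) + 1) * p = row * p + p := by push_cast; ring
    have hn : n ≤ row * p := by omega
    rw [PySem.List.pyRange_one_eq_nil hn, PySem.List.pyRange_one_eq_nil (by push_cast; omega)]
    simp
  | succ m ih =>
    intro row hr hfd
    have hb := (PySem.Int.floordiv_eq_iff_of_pos hp).mp hfd
    have h1 : (row + (m + 1 : Nat)) * p = row * p + (m : Int) * p + p := by push_cast; ring
    have h2 : (row + (m + 1 : Nat) + 1) * p = row * p + (m : Int) * p + 2 * p := by push_cast; ring
    have hmp : 0 ≤ (m : Int) * p := mul_nonneg (by positivity) (le_of_lt hp)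
    have hlow : row * p < n := by omega
    have hrp1 : (row + 1) * p = row * p + p := by ring
    have hm1le : row * p ≤ min ((row + 1) * p) n := by omega
    have hm1ge : min ((row + 1) * p) n ≤ n := by omega
    rw [PySem.List.pyRange_one_append (row * p) (min ((row + 1) * p) n) n hm1le hm1ge,
        List.map_append, pv_chunk p sx sy n row hp]
    have hrow_lt : row < row + (m + 1 : Nat) := by push_cast; omega
    rw [PySem.List.pyRange_one_cons hrow_lt, List.flatMap_cons]
    congr 1
    have hrec : (PySem.List.pyRange (min ((row + 1) * p) n) n 1).map (pvF p sx sy)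
        = (PySem.List.pyRange ((row + 1) * p) n 1).map (pvF p sx sy) := by
      by_cases h : (row + 1) * p ≤ n
      · rw [min_eq_left h]
      · rw [min_eq_right (by omega), PySem.List.pyRange_one_eq_nil (le_refl n),
            PySem.List.pyRange_one_eq_nil (by omega)]
    rw [hrec, ih (row + 1) (by omega) (by push_cast at hfd ⊢; omega)]
    have harg : row + 1 + (m : Int) = row + ((m : Nat) + 1 : Nat) := by push_cast; ring
    rw [harg]

-- ===== VERDICT (by name: the statement is the Claim_ definition above) =====
theorem compute_snake_coordinates_spec : Claim_equal_compute_snake_coordinates := by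
  intro n sx sy _
  unfold Spec_compute_snake_coordinates
  set p : Int := if n ≤ 6 then max 3 (min 6 n) else 6 with hpdef
  have hp : 0 < p := by rw [hpdef]; split <;> omega
  set rows : Int := PySem.Int.floordiv (n + p - 1) p with hrowsdef
  have hA : compute_snake_coordinates n sx sy
      = (PySem.List.pyRange 0 n 1).foldl (fun acc idx => acc ++ [pvF p sx sy idx]) [] := rfl
  have hB : compute_snake_coordinates_alt n sx sy
      = (PySem.List.pyRange 0 rows 1).foldl (fun coords row =>
          (if PySem.Int.mod row 2 = 0
            then PySem.List.pyRange 0 (min p (n - row * p)) 1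
            else PySem.List.pyRange (p - 1) (p - 1 - min p (n - row * p)) (-1)).foldl
            (fun acc col => acc ++ [(col * sx, row * sy)]) coords) [] := rfl
  rw [hA, hB, pv_foldl_push, pv_foldl_nested]
  have hHeq : (fun r => (if PySem.Int.mod r 2 = 0
      then PySem.List.pyRange 0 (min p (n - r * p)) 1
      else PySem.List.pyRange (p - 1) (p - 1 - min p (n - r * p)) (-1)).map
      (fun c => (c * sx, r * sy))) = pvH p sx sy n := by
    funext r
    simp [pvH]
  rw [hHeq]
  by_cases hn : n ≤ 0
  · have hrows0 : rows ≤ 0 := by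
      have := (PySem.Int.floordiv_lt_iff_lt_mul (a := n + p - 1) (q := 1) hp).mpr (by omega)
      omega
    rw [PySem.List.pyRange_one_eq_nil hn, PySem.List.pyRange_one_eq_nil hrows0]
    simp
  · have hn' : 0 < n := by omega
    have hrowspos : 0 < rows := by
      have := (PySem.Int.le_floordiv_iff_mul_le (a := n + p - 1) (q := 1) hp).mpr (by omega)
      omega
    have hcast : (rows.toNat : Int) = rows := Int.toNat_of_nonneg (le_of_lt hrowspos)
    have := pv_key p sx sy n hp rows.toNat 0 (le_refl 0) (by rw [← hrowsdef]; omega)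
    rw [zero_mul] at this
    rw [this, show ((0:Int) + ((rows.toNat : Nat) : Int)) = rows from by omega]
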